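-- pv_equiv track=rewrite | github.com/MrBrantCode/unitest_baseline | mut_generate/mist_train_cf/cf_22226/solution.py | find_longest_even_unique_words
-- ===== SOURCE A (Python) =====
-- def find_longest_even_unique_words(words):
--     max_length = 0
--     result = []
--
--     for word in words:
--         if len(word) % 2 == 0 and len(set(word)) == len(word) and len(word) > max_length:
--             max_length = len(word)
--             result = [word]
--         elif len(word) % 2 == 0 and len(set(word)) == len(word) and len(word) == max_length:
--             result.append(word)
--
--     return result
-- ===== SOURCE B (Python) =====
-- def find_longest_even_unique_words(words):
--     valid = [w for w in words if len(w) % 2 == 0 and len(set(w)) == len(w)]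
--     if not valid:
--         return []
--     m = max(len(w) for w in valid)
--     return [w for w in valid if len(w) == m]
-- ===== Notes on version B (the rewrite author's own statement) =====
-- stated objective: alternative
-- what changed: Replaces A's fused running-max scan that maintains a result list with a filter-then-max-then-filter pipeline over the valid words.
import Mathlib
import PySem

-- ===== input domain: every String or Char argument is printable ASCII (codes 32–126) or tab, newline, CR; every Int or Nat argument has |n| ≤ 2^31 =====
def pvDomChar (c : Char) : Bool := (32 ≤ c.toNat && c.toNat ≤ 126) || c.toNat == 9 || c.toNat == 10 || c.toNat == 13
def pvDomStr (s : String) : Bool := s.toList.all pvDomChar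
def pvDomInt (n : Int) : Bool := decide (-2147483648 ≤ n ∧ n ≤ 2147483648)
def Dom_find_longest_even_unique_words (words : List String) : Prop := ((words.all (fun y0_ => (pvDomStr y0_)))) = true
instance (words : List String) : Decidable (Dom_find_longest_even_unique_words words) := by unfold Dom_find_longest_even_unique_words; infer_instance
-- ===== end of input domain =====

-- B replaces A's fused running-max scan by a filter-then-max-then-filter pipeline (objective: alternative decomposition).
-- ===== PORT A =====
-- A: one fused scan keeping the running max length and the running result list.
def pvValidA (w : String) : Bool :=
  w.toList.length % 2 == 0 && (PySem.Set.ofList w.toList).length == w.toList.length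

def pvStepA (st : Nat × List String) (w : String) : Nat × List String :=
  if pvValidA w && decide (w.toList.length > st.1) then (w.toList.length, [w])
  else if pvValidA w && (w.toList.length == st.1) then (st.1, st.2 ++ [w])
  else st

def find_longest_even_unique_words (words : List String) : List String :=
  (words.foldl pvStepA (0, [])).2

-- ===== PORT B =====
-- B: filter the valid words, take the max length, filter again.
def pvValidB (w : String) : Bool :=
  w.toList.length % 2 == 0 && (PySem.Set.ofList w.toList).length == w.toList.length

def find_longest_even_unique_words_alt (words : List String) : List String :=
  let valid := words.filter pvValidB
  if valid.isEmpty then []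
  else
    let m := (valid.map (fun w => w.toList.length)).foldl Nat.max 0
    valid.filter (fun w => w.toList.length == m)

-- ===== PRECONDITION & SPEC =====
def Spec_find_longest_even_unique_words (words : List String) (out : List String) : Prop := out = find_longest_even_unique_words_alt words
instance (words : List String) (out : List String) : Decidable (Spec_find_longest_even_unique_words words out) := by unfold Spec_find_longest_even_unique_words; infer_instance

-- ===== CLAIM (what is proved, stated in full; the proofs are below) =====
def Claim_equal_find_longest_even_unique_words : Prop := ∀ (words : List String), Dom_find_longest_even_unique_words words → Spec_find_longest_even_unique_words words (find_longest_even_unique_words words)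

-- ===== LEMMAS AND PROOFS =====

theorem pvLeFoldlMax (L : List Nat) (a : Nat) : a ≤ L.foldl Nat.max a := by
  induction L generalizing a with
  | nil => exact Nat.le_refl a
  | cons x xs ihx => exact Nat.le_trans (Nat.le_max_left a x) (ihx _)

-- Characterisation of A's loop from an arbitrary state (m, r).
theorem pvLoopA (ws : List String) (m : Nat) (r : List String) :
    ws.foldl pvStepA (m, r) =
      (((ws.filter pvValidA).map String.length).foldl Nat.max m,
       (if m < ((ws.filter pvValidA).map String.length).foldl Nat.max m then [] else r) ++
         (ws.filter pvValidA).filter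
           (fun w => w.length == ((ws.filter pvValidA).map String.length).foldl Nat.max m)) := by
  induction ws generalizing m r with
  | nil => simp
  | cons w ws ih =>
    by_cases hv : pvValidA w = true
    · simp only [List.foldl_cons, List.filter_cons, hv, if_true, List.map_cons]
      rcases Nat.lt_trichotomy m w.length with hlt | heq | hgt
      · -- len w > m : reset to (len w, [w])
        have hstep : pvStepA (m, r) w = (w.length, [w]) := by
          simp only [pvStepA, hv, Bool.true_and, String.length]
          rw [if_pos (by simpa using hlt)]
        rw [hstep, ih]
        have hmax : Nat.max m w.length = w.length := Nat.max_eq_right (Nat.le_of_lt hlt)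
        rw [hmax]
        have hge : w.length ≤ (((ws.filter pvValidA).map String.length).foldl Nat.max w.length) :=
          pvLeFoldlMax _ _
        rw [if_pos (Nat.lt_of_lt_of_le hlt hge), List.nil_append]
        by_cases hw : w.length = ((ws.filter pvValidA).map String.length).foldl Nat.max w.length
        · rw [if_neg (by omega : ¬ w.length < _), if_pos (by simpa using hw)]
          simp
        · rw [if_pos (by omega : w.length < _), if_neg (by simpa using hw)]
          simp
      · -- len w = m : append
        have hstep : pvStepA (m, r) w = (m, r ++ [w]) := by
          simp only [pvStepA, hv, Bool.true_and]
          rw [if_neg (by simpa using (by omega : ¬ m < w.length)), if_pos (by simpa using heq.symm)]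
        rw [hstep, ih]
        have hmax : Nat.max m w.length = m := by simp [heq]
        rw [hmax]
        by_cases hc : m < ((ws.filter pvValidA).map String.length).foldl Nat.max m
        · rw [if_pos hc, if_pos hc,
              if_neg (show ¬ ((w.length == ((ws.filter pvValidA).map String.length).foldl Nat.max m) = true) by
                simp only [beq_iff_eq]; omega)]
        · have heqM : ((ws.filter pvValidA).map String.length).foldl Nat.max m = m := by
            have := pvLeFoldlMax ((ws.filter pvValidA).map String.length) m
            omega
          rw [if_neg hc, if_neg hc,
              if_pos (show ((w.length == ((ws.filter pvValidA).map String.length).foldl Nat.max m) = true) by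
                simp only [beq_iff_eq]; omega)]
          simp
      · -- len w < m : state unchanged, w still collected by the filter condition? no: excluded
        have hstep : pvStepA (m, r) w = (m, r) := by
          simp only [pvStepA, hv, Bool.true_and]
          rw [if_neg (by simpa using (by omega : ¬ m < w.length)),
              if_neg (by simpa using (by omega : ¬ w.length = m))]
        rw [hstep, ih]
        have hmax : Nat.max m w.length = m := Nat.max_eq_left (Nat.le_of_lt hgt)
        rw [hmax]
        have hge : m ≤ (((ws.filter pvValidA).map String.length).foldl Nat.max m) :=
          pvLeFoldlMax _ _
        rw [if_neg (show ¬ ((w.length == ((ws.filter pvValidA).map String.length).foldl Nat.max m) = true) by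
              simp only [beq_iff_eq]; omega)]
    · simp only [List.foldl_cons, List.filter_cons, hv]
      have hstep : pvStepA (m, r) w = (m, r) := by
        simp [pvStepA, hv]
      rw [hstep, ih]
      simp

-- ===== VERDICT (by name: the statement is the Claim_ definition above) =====
theorem find_longest_even_unique_words_spec : Claim_equal_find_longest_even_unique_words := by
  intro words _
  unfold Spec_find_longest_even_unique_words find_longest_even_unique_words
    find_longest_even_unique_words_alt
  have hval : pvValidB = pvValidA := rfl
  rw [hval, pvLoopA]
  by_cases hV : (words.filter pvValidA).isEmpty
  · rw [if_pos hV]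
    rw [List.isEmpty_iff] at hV
    simp [hV]
  · rw [if_neg hV]
    simp only [ite_self, List.nil_append, String.length_toList]
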